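-- pv_equiv track=rewrite | github.com/Stanislus29/stangorithms | kmap_algorithm/kmapsolver_final_prototype.py | simplify_group_bits
-- ===== SOURCE A (Python) =====
-- num_vars = 4   # <-- Change this to 2, 3, or 4 as needed
--
-- def simplify_group_bits(bits_list):
--     # Each cell in the K-map was converted to a bitstring by cell_to_minterm(),
--     # e.g., col_labels[c] + row_labels[r] → "1011" for (x1=1, x2=0, x3=1, x4=1).
--     # bits_list contains those strings for all cells in the current group.
--
--     # Start with the bit pattern of the first cell in the group
--     bits = list(bits_list[0])
--
--     # Compare against the remaining cells in the group
--     for b in bits_list[1:]: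
--         # Look at each of the input variables (x1, x2, x3, x4)
--         for i in range(len(bits)):
--             # If this variable differs across any two cells, mark it as '-'
--             # '-' means "don't care" → the variable is eliminated from the implicant
--             #
--             # Example:
--             #   bits_list = ["1011", "1001"]  (two adjacent cells)
--             #   Compare:
--             #      x1: '1' vs '1' → keep '1'
--             #      x2: '0' vs '0' → keep '0'
--             #      x3: '1' vs '0' → mismatch → '-'
--             #      x4: '1' vs '1' → keep '1'
--             #   Result = "10-1" → x1 x2' x4
--             if bits[i] != b[i]:
--                 bits[i] = '-'
--
--     vars_ = ['x1', 'x2', 'x3', 'x4'][:num_vars]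
--     term = []
--
--     # Translate the simplified bit pattern into a Boolean product term
--     for i, b in enumerate(bits):
--         if b == '0':
--             term.append(vars_[i] + "'")  # '0' → variable appears complemented
--         elif b == '1':
--             term.append(vars_[i])        # '1' → variable appears uncomplemented
--         # '-' → variable drops out completely (not added to the term)
--
--     # Return the final simplified product term (SOP component)
--     return "".join(term)
-- ===== SOURCE B (Python) =====
-- num_vars = 4   # <-- Change this to 2, 3, or 4 as needed
--
-- def simplify_group_bits(bits_list):
--     # Column-wise reduction: a position keeps its character only if every
--     # cell in the group agrees on it; otherwise it becomes '-' (don't care).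
--     first = bits_list[0]
--     bits = [c if len({b[i] for b in bits_list}) == 1 else '-'
--             for i, c in enumerate(first)]
--     vars_ = ['x1', 'x2', 'x3', 'x4'][:num_vars]
--     return "".join(vars_[i] + "'" if c == '0'
--                    else (vars_[i] if c == '1' else '')
--                    for i, c in enumerate(bits))
-- ===== Notes on version B (the rewrite author's own statement) =====
-- stated objective: simpler
-- what changed: Phase one is reduced column-by-column (each position keeps its character iff the set of that column's characters is a singleton) with a comprehension instead of A's row-fold that mutates an accumulator cell-by-cell, and the translation pass is a join over a generator instead of A's append-to-list loop; the comprehensions avoid A's per-element list mutation and indexing overhead.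
import Mathlib
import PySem

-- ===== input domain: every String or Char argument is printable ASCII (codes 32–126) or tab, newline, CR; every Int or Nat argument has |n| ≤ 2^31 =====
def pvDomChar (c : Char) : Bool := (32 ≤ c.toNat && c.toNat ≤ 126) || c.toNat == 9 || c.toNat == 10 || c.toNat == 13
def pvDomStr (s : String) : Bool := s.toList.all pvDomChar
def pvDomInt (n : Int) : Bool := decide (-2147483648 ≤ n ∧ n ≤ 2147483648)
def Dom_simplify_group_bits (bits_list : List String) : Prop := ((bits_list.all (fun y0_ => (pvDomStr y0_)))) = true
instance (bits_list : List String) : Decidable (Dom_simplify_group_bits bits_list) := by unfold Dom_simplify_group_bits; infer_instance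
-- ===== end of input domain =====

-- B replaces A's cell-by-cell accumulator fold with a column-wise singleton-set reduction and a
-- join over per-position pieces (objective: simpler); return values only, no argument is mutated.

-- ===== PORT A =====
def num_vars : Int := 4

def varNames : List (List Char) := [['x','1'], ['x','2'], ['x','3'], ['x','4']]

-- inner loop: for i in range(len(bits)): if bits[i] != b[i]: bits[i] = '-'
-- (Python's b[i] raises IndexError when b is shorter; such inputs are outside Pre_,
--  here the two cells are compared as options)
def aStep (b : List Char) (bits : List Char) (i : Nat) : List Char :=
  if bits[i]? ≠ b[i]? then bits.set i '-' else bits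

def aInner (bits : List Char) (b : List Char) : List Char :=
  (List.range bits.length).foldl (aStep b) bits

def simplify_group_bits (bits_list : List String) : String :=
  -- bits_list[0] raises IndexError on the empty list; outside Pre_ (headD default)
  let bits := (bits_list.headD "").toList
  let bits := (bits_list.drop 1).foldl (fun bits b => aInner bits b.toList) bits
  let vars_ := PySem.List.slice varNames none (some num_vars)
  let term := (PySem.List.enumerate bits).foldl
    (fun term ib =>
      -- vars_[i] raises IndexError for i ≥ 4 with a '0'/'1' bit; outside Pre_ (getD default)
      if ib.2 == '0' then term ++ [vars_.getD ib.1.toNat [] ++ ['\'']]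
      else if ib.2 == '1' then term ++ [vars_.getD ib.1.toNat []]
      else term) []
  String.ofList (PySem.Chars.join [] term)

-- ===== PORT B =====
def simplify_group_bits_alt (bits_list : List String) : String :=
  -- bits_list[0] and b[i] raise IndexError exactly as in A; outside Pre_ (headD/pyGetD default)
  let first := (bits_list.headD "").toList
  let bits := (PySem.List.enumerate first).map (fun ic =>
    if (PySem.Set.ofList (bits_list.map (fun b => PySem.List.pyGetD b.toList ic.1 ' '))).length == 1
    then ic.2 else '-')
  let vars_ := PySem.List.slice varNames none (some num_vars)
  -- vars_[i] raises IndexError for i ≥ 4 with a '0'/'1' bit, as in A; outside Pre_ (getD default)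
  String.ofList (PySem.Chars.join [] ((PySem.List.enumerate bits).map (fun ic =>
    if ic.2 == '0' then vars_.getD ic.1.toNat [] ++ ['\'']
    else if ic.2 == '1' then vars_.getD ic.1.toNat []
    else [])))

-- ===== PRECONDITION & SPEC =====
-- Pre_ excludes exactly the inputs on which both A and B raise IndexError: the empty list
-- (bits_list[0]), a later cell shorter than the first (b[i]), and a merged pattern that
-- still has '0'/'1' at a position ≥ 4 (vars_[i]).
def Pre_simplify_group_bits (bits_list : List String) : Prop :=
  bits_list ≠ [] ∧
  (∀ b ∈ bits_list.drop 1, (bits_list.headD "").toList.length ≤ b.toList.length) ∧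
  (∀ i ∈ List.range (bits_list.headD "").toList.length, 4 ≤ i →
    ((bits_list.headD "").toList.getD i ' ' = '0' ∨ (bits_list.headD "").toList.getD i ' ' = '1') →
    ∃ b ∈ bits_list.drop 1, b.toList.getD i ' ' ≠ (bits_list.headD "").toList.getD i ' ')
instance (bits_list : List String) : Decidable (Pre_simplify_group_bits bits_list) := by
  unfold Pre_simplify_group_bits; infer_instance

def pvWitness_simplify_group_bits : List String := ["1011", "1001"]

def Spec_simplify_group_bits (bits_list : List String) (out : String) : Prop := out = simplify_group_bits_alt bits_list
instance (bits_list : List String) (out : String) : Decidable (Spec_simplify_group_bits bits_list out) := by unfold Spec_simplify_group_bits; infer_instance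

-- ===== CLAIM (what is proved, stated in full; the proofs are below) =====
def Claim_equal_simplify_group_bits : Prop := ∀ (bits_list : List String), Dom_simplify_group_bits bits_list → Pre_simplify_group_bits bits_list → Spec_simplify_group_bits bits_list (simplify_group_bits bits_list)

-- ===== LEMMAS AND PROOFS =====

lemma aStep_eq (b bits : List Char) (i : Nat) :
    aStep b bits i = if bits[i]? ≠ b[i]? then bits.set i '-' else bits := rfl

lemma aStep_length (b bits : List Char) (i : Nat) : (aStep b bits i).length = bits.length := by
  unfold aStep; split <;> simp

-- A's inner loop preserves the length of the accumulator
lemma foldl_step_length (b : List Char) (l : List Nat) (init : List Char) :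
    (l.foldl (aStep b) init).length = init.length := by
  induction l generalizing init with
  | nil => rfl
  | cons x t ih => simp only [List.foldl_cons]; rw [ih, aStep_length]

-- partial-run characterisation of A's inner loop
lemma aInner_go (bits b : List Char) (m : Nat) : ∀ j,
    ((List.range m).foldl (aStep b) bits)[j]?
      = if j < m then (bits[j]?).map (fun c => if b[j]? = some c then c else '-') else bits[j]? := by
  induction m with
  | zero => intro j; simp
  | succ m ih =>
    intro j
    rw [List.range_succ, List.foldl_append, List.foldl_cons, List.foldl_nil]
    have hSm := ih m
    rw [if_neg (lt_irrefl m)] at hSm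
    have hSlen : ((List.range m).foldl (aStep b) bits).length = bits.length :=
      foldl_step_length b _ bits
    rw [aStep_eq]
    split
    case isTrue hc =>
      rw [hSm] at hc
      rw [List.getElem?_set]
      by_cases hj : j = m
      · subst hj
        cases hb : bits[j]? with
        | none =>
          have hge : bits.length ≤ j := List.getElem?_eq_none_iff.mp hb
          rw [if_pos rfl, if_neg (by omega)]
          simp
        | some c =>
          have hjlt : j < bits.length := by
            by_contra hcon
            rw [List.getElem?_eq_none (by omega)] at hb; cases hb
          rw [if_pos rfl, if_pos (by omega), if_pos (Nat.lt_succ_self j)]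
          rw [hb] at hc
          have hne : ¬ b[j]? = some c := fun h => hc h.symm
          simp [hne]
      · rw [if_neg (fun h => hj h.symm), ih j]
        by_cases hjm : j < m
        · rw [if_pos hjm, if_pos (by omega)]
        · rw [if_neg hjm, if_neg (by omega)]
    case isFalse hc =>
      rw [hSm] at hc
      push_neg at hc
      by_cases hj : j = m
      · subst hj
        rw [ih j, if_neg (lt_irrefl j), if_pos (Nat.lt_succ_self j)]
        cases hb : bits[j]? with
        | none => simp
        | some c =>
          rw [hb] at hc
          simp [← hc]
      · rw [ih j]
        by_cases hjm : j < m
        · rw [if_pos hjm, if_pos (by omega)]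
        · rw [if_neg hjm, if_neg (by omega)]

lemma aInner_getElem? (bits b : List Char) (j : Nat) :
    (aInner bits b)[j]? = (bits[j]?).map (fun c => if b[j]? = some c then c else '-') := by
  unfold aInner
  rw [aInner_go]
  by_cases hj : j < bits.length
  · rw [if_pos hj]
  · rw [if_neg hj, List.getElem?_eq_none (by omega)]
    simp

-- the whole merge phase, pointwise: a position keeps f's character iff every cell agrees there
lemma merge_getElem? (L : List (List Char)) (f : List Char) (j : Nat) :
    (L.foldl aInner f)[j]?
      = (f[j]?).map (fun c => if L.all (fun b => b[j]? == some c) then c else '-') := by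
  induction L using List.reverseRecOn with
  | nil =>
    simp only [List.foldl_nil, List.all_nil]
    cases hf : f[j]? <;> simp
  | append_singleton L b ih =>
    rw [List.foldl_append]
    simp only [List.foldl_cons, List.foldl_nil]
    rw [aInner_getElem?, ih]
    cases hf : f[j]? with
    | none => simp
    | some c =>
      simp only [Option.map_some, List.all_append, List.all_cons, List.all_nil, Bool.and_true]
      by_cases hall : L.all (fun b => b[j]? == some c)
      · simp only [hall, if_true, Bool.true_and]
        by_cases hb : b[j]? = some c
        · simp [hb]
        · simp [hb]
      · simp only [hall, Bool.false_and, Bool.false_eq_true, if_false, Option.map_some]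
        split <;> rfl

-- a Set fold only ever appends, so the seed stays a prefix
lemma foldl_add_prefix (t : List Char) (s : PySem.Set Char) :
    s <+: t.foldl PySem.Set.add s := by
  induction t generalizing s with
  | nil => exact List.prefix_refl s
  | cons x t ih =>
    refine List.IsPrefix.trans ?_ (ih (PySem.Set.add s x))
    unfold PySem.Set.add
    split
    · exact List.prefix_refl s
    · exact List.prefix_append s [x]

lemma foldl_add_const (a : Char) (t : List Char) (h : ∀ x ∈ t, x = a) :
    t.foldl PySem.Set.add [a] = [a] := by
  induction t with
  | nil => rfl
  | cons x t ih =>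
    have hx : x = a := h x (List.mem_cons_self)
    subst hx
    simp only [List.foldl_cons]
    have hadd : PySem.Set.add [x] x = [x] := by simp [PySem.Set.add, PySem.Set.contains]
    rw [hadd]
    exact ih (fun y hy => h y (List.mem_cons_of_mem _ hy))

-- len(set(a::t)) == 1  iff the column is constant
lemma ofList_cons_len_one_iff (a : Char) (t : List Char) :
    (PySem.Set.ofList (a :: t)).length = 1 ↔ ∀ x ∈ t, x = a := by
  have hdef : PySem.Set.ofList (a :: t) = t.foldl PySem.Set.add [a] := by
    rw [PySem.Set.ofList_eq_foldl]
    simp only [List.foldl_cons]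
    rfl
  constructor
  · intro h x hx
    have hpre : [a] <+: PySem.Set.ofList (a :: t) := by
      rw [hdef]; exact foldl_add_prefix t [a]
    have heq : PySem.Set.ofList (a :: t) = [a] := by
      rcases hpre with ⟨r, hr⟩
      have hr0 : r = [] := by
        have hl := congrArg List.length hr
        simp only [List.length_append, List.length_cons, List.length_nil, h] at hl
        exact List.eq_nil_of_length_eq_zero (by omega)
      rw [hr0, List.append_nil] at hr
      exact hr.symm
    have hx' : x ∈ PySem.Set.ofList (a :: t) :=
      (PySem.Set.mem_ofList _ _).mpr (List.mem_cons_of_mem _ hx)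
    rw [heq] at hx'
    simpa using hx'
  · intro h
    rw [hdef, foldl_add_const a t h]
    rfl

-- the two merge phases produce the same bit pattern (given no cell is shorter than the first)
lemma bits_eq (s : String) (rest : List String)
    (hlen : ∀ b ∈ rest, s.toList.length ≤ b.toList.length) :
    (PySem.List.enumerate s.toList).map (fun ic =>
        if (PySem.Set.ofList ((s :: rest).map (fun b => PySem.List.pyGetD b.toList ic.1 ' '))).length == 1
        then ic.2 else '-')
      = (rest.map String.toList).foldl aInner s.toList := by
  apply List.ext_getElem?
  intro j
  rw [List.getElem?_map, PySem.List.getElem?_enumerate, merge_getElem?]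
  cases hf : s.toList[j]? with
  | none => simp
  | some c =>
    have hj : j < s.toList.length := by
      by_contra h
      rw [List.getElem?_eq_none (by omega)] at hf; cases hf
    simp only [Option.map_some, List.map_cons, zero_add, PySem.List.pyGetD_natCast,
      List.getD_eq_getElem?_getD, hf, Option.getD_some]
    have hcol : ∀ b ∈ rest, (b.toList[j]?.getD ' ' = c ↔ b.toList[j]? = some c) := by
      intro b hb
      have hjb : j < b.toList.length := lt_of_lt_of_le hj (hlen b hb)
      rw [List.getElem?_eq_getElem hjb]
      simp
    by_cases H : ∀ b ∈ rest, b.toList[j]? = some c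
    · have h1 : (PySem.Set.ofList (c :: rest.map (fun b => b.toList[j]?.getD ' '))).length = 1 := by
        rw [ofList_cons_len_one_iff]
        intro x hx
        rcases List.mem_map.mp hx with ⟨b, hb, rfl⟩
        exact (hcol b hb).mpr (H b hb)
      have h2 : ((rest.map String.toList).all (fun b => b[j]? == some c)) = true := by
        rw [List.all_map, List.all_eq_true]
        intro b hb
        simpa using H b hb
      simp [h1, h2]
    · push_neg at H
      rcases H with ⟨b, hb, hbc⟩
      have h1 : ¬ (PySem.Set.ofList (c :: rest.map (fun b => b.toList[j]?.getD ' '))).length = 1 := by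
        rw [ofList_cons_len_one_iff]
        intro hc
        exact hbc ((hcol b hb).mp (hc _ (List.mem_map.mpr ⟨b, hb, rfl⟩)))
      have h2 : ¬ ((rest.map String.toList).all (fun b => b[j]? == some c)) = true := by
        rw [List.all_map, List.all_eq_true]
        intro hc
        exact hbc (by simpa using hc b hb)
      simp [h1, h2]

-- ''.join with empty separator is concatenation
lemma join_nil_eq_flatten (l : List (List Char)) : PySem.Chars.join [] l = l.flatten := by
  induction l with
  | nil => simp
  | cons a t ih =>
    cases t with
    | nil => simp [PySem.Chars.join_singleton]
    | cons b u =>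
      rw [PySem.Chars.join_cons_cons, List.flatten_cons, ← ih]
      simp

-- one translated piece per position, as functions
def pieceA (names : List (List Char)) (ib : Int × Char) : List (List Char) :=
  if ib.2 == '0' then [names.getD ib.1.toNat [] ++ ['\'']]
  else if ib.2 == '1' then [names.getD ib.1.toNat []]
  else []

def pieceB (names : List (List Char)) (ib : Int × Char) : List Char :=
  if ib.2 == '0' then names.getD ib.1.toNat [] ++ ['\'']
  else if ib.2 == '1' then names.getD ib.1.toNat []
  else []

lemma term_foldl_eq (names : List (List Char)) (l : List (Int × Char)) (acc : List (List Char)) :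
    l.foldl (fun term ib =>
        if ib.2 == '0' then term ++ [names.getD ib.1.toNat [] ++ ['\'']]
        else if ib.2 == '1' then term ++ [names.getD ib.1.toNat []]
        else term) acc
      = acc ++ l.flatMap (pieceA names) := by
  induction l generalizing acc with
  | nil => simp
  | cons p t ih =>
    simp only [List.foldl_cons, List.flatMap_cons]
    rw [ih]
    unfold pieceA
    split_ifs <;> simp

-- A's flatMap of singleton/empty pieces flattens to B's map of the same pieces
lemma phase2 (names : List (List Char)) (l : List (Int × Char)) :
    (l.flatMap (pieceA names)).flatten = (l.map (pieceB names)).flatten := by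
  induction l with
  | nil => rfl
  | cons p t ih =>
    rw [List.flatMap_cons, List.map_cons, List.flatten_append, List.flatten_cons, ih]
    congr 1
    unfold pieceA pieceB
    split_ifs <;> simp

-- ===== VERDICT (by name: the statement is the Claim_ definition above) =====
theorem simplify_group_bits_spec : Claim_equal_simplify_group_bits := by
  intro bits_list hdom hpre
  obtain ⟨hne, hlen, _⟩ := hpre
  obtain ⟨s, rest, rfl⟩ := List.exists_cons_of_ne_nil hne
  simp only [List.headD_cons, List.drop_succ_cons, List.drop_zero] at hlen
  unfold Spec_simplify_group_bits simplify_group_bits simplify_group_bits_alt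
  simp only [List.headD_cons, List.drop_succ_cons, List.drop_zero]
  rw [← List.foldl_map (f := String.toList) (g := aInner)]
  rw [bits_eq s rest hlen]
  rw [term_foldl_eq, List.nil_append, join_nil_eq_flatten, join_nil_eq_flatten]
  have hB : ((PySem.List.enumerate ((rest.map String.toList).foldl aInner s.toList)).map (fun ic =>
      if ic.2 == '0' then (PySem.List.slice varNames none (some num_vars)).getD ic.1.toNat [] ++ ['\'']
      else if ic.2 == '1' then (PySem.List.slice varNames none (some num_vars)).getD ic.1.toNat []
      else []))
      = (PySem.List.enumerate ((rest.map String.toList).foldl aInner s.toList)).map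
          (pieceB (PySem.List.slice varNames none (some num_vars))) := rfl
  rw [hB]
  exact congrArg String.ofList (phase2 _ _)
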